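-- pv_equiv track=rewrite | github.com/threefoldfoundation/node-status-bot | dispatcher.py | format_nodes
-- ===== SOURCE A (Python) =====
-- def format_nodes(up, down, standby):
--     up.sort()
--     down.sort()
--     standby.sort()
--     text = ''
--
--     if up:
--         text += '<b><u>Up nodes:</u></b>\n'
--         for node in up:
--             text += str(node) + '\n'
--     if down:
--         if up:
--             text += '\n'
--         text += '<b><u>Down nodes:</u></b>\n'
--         for node in down:
--             text += str(node) + '\n'
--
--     if standby:
--         if up or down:
--             text += '\n'
--         text += '<b><u>Standby nodes:</u></b>\n'
--         for node in standby:
--             text += str(node) + '\n'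
--
--     return text
-- ===== SOURCE B (Python) =====
-- def _render(sections):
--     if not sections:
--         return ''
--     header, nodes = sections[0]
--     rest = _render(sections[1:])
--     if not nodes:
--         return rest
--     return (header + '\n' + '\n'.join(map(str, nodes)) + '\n'
--             + ('\n' if rest else '') + rest)
--
--
-- def format_nodes(up, down, standby):
--     up.sort()
--     down.sort()
--     standby.sort()
--     return _render([('<b><u>Up nodes:</u></b>', up),
--                     ('<b><u>Down nodes:</u></b>', down),
--                     ('<b><u>Standby nodes:</u></b>', standby)])
-- ===== Notes on version B (the rewrite author's own statement) =====
-- stated objective: simpler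
-- what changed: Replaces A's single forward string accumulation, whose blank lines are inserted by looking back at which earlier sections were non-empty, with a recursive back-to-front rendering of (header, list) sections where each non-empty section decides its separator by whether anything follows, and per-node lines are produced by '\n'.join(map(str, nodes)) instead of a += loop.
import Mathlib
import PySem

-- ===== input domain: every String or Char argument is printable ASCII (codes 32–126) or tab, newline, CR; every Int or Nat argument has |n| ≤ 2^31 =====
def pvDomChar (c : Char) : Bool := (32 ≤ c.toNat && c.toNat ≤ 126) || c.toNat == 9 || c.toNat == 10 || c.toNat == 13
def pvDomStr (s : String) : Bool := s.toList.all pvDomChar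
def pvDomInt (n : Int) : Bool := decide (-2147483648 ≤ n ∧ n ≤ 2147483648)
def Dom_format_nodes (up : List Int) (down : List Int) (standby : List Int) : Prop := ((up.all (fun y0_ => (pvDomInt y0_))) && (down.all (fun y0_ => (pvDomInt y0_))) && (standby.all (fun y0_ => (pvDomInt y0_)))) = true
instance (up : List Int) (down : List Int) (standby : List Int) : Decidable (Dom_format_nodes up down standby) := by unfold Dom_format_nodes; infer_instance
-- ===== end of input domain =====

-- B replaces A's forward accumulation with look-behind blank lines by a recursive
-- back-to-front rendering of (header, list) sections where the separator is decided
-- by what follows (simpler decomposition). A sorts its arguments in place; the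
-- equivalence proved is about the return value only (B performs the same in-place sorts).


-- ===== PORT A =====
def format_nodes (up : List Int) (down : List Int) (standby : List Int) : String :=
  let up := PySem.List.sorted up (fun x => x) false
  let down := PySem.List.sorted down (fun x => x) false
  let standby := PySem.List.sorted standby (fun x => x) false
  let text := ""
  let text :=
    if up ≠ [] then
      up.foldl (fun t node => t ++ PySem.Int.toStr node ++ "\n")
        (text ++ "<b><u>Up nodes:</u></b>\n")
    else text
  let text :=
    if down ≠ [] then
      down.foldl (fun t node => t ++ PySem.Int.toStr node ++ "\n")
        ((if up ≠ [] then text ++ "\n" else text) ++ "<b><u>Down nodes:</u></b>\n")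
    else text
  let text :=
    if standby ≠ [] then
      standby.foldl (fun t node => t ++ PySem.Int.toStr node ++ "\n")
        ((if up ≠ [] ∨ down ≠ [] then text ++ "\n" else text) ++ "<b><u>Standby nodes:</u></b>\n")
    else text
  text

-- ===== PORT B =====
-- hand port of Python str.join(sep, parts), exact: "" for [], otherwise parts interleaved with sep
def pyJoin (sep : String) : List String → String
  | [] => ""
  | [x] => x
  | x :: xs => x ++ sep ++ pyJoin sep xs

-- port of _render: back-to-front recursion; separator decided by whether anything follows
def pvRender : List (String × List Int) → String
  | [] => ""
  | (header, nodes) :: sections =>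
    let rest := pvRender sections
    if nodes = [] then rest
    else header ++ "\n" ++ pyJoin "\n" (nodes.map PySem.Int.toStr) ++ "\n" ++
         (if rest ≠ "" then "\n" else "") ++ rest

def format_nodes_alt (up : List Int) (down : List Int) (standby : List Int) : String :=
  let up := PySem.List.sorted up (fun x => x) false
  let down := PySem.List.sorted down (fun x => x) false
  let standby := PySem.List.sorted standby (fun x => x) false
  pvRender [("<b><u>Up nodes:</u></b>", up),
            ("<b><u>Down nodes:</u></b>", down),
            ("<b><u>Standby nodes:</u></b>", standby)]

-- ===== PRECONDITION & SPEC =====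
def Spec_format_nodes (up : List Int) (down : List Int) (standby : List Int) (out : String) : Prop := out = format_nodes_alt up down standby
instance (up : List Int) (down : List Int) (standby : List Int) (out : String) : Decidable (Spec_format_nodes up down standby out) := by unfold Spec_format_nodes; infer_instance

-- ===== CLAIM (what is proved, stated in full; the proofs are below) =====
def Claim_equal_format_nodes : Prop := ∀ (up : List Int) (down : List Int) (standby : List Int), Dom_format_nodes up down standby → Spec_format_nodes up down standby (format_nodes up down standby)

-- ===== LEMMAS AND PROOFS =====
-- proof-only helper: the per-line concatenation both sides denote
def lineCat : List Int → String
  | [] => ""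
  | n :: ns => PySem.Int.toStr n ++ "\n" ++ lineCat ns

theorem foldl_eq_lineCat (l : List Int) (s : String) :
    l.foldl (fun t node => t ++ PySem.Int.toStr node ++ "\n") s = s ++ lineCat l := by
  induction l generalizing s with
  | nil => simp [lineCat]
  | cons x xs ih => rw [List.foldl_cons, ih]; simp [lineCat, String.append_assoc]

theorem join_eq_lineCat (x : Int) (xs : List Int) (s : String) :
    s ++ pyJoin "\n" (PySem.Int.toStr x :: xs.map PySem.Int.toStr) ++ "\n" = s ++ lineCat (x :: xs) := by
  induction xs generalizing x s with
  | nil => simp [pyJoin, lineCat, ← String.append_assoc]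
  | cons y ys ih =>
    have h := ih (x := y) (s := s ++ PySem.Int.toStr x ++ "\n")
    simp only [List.map_cons] at *
    simp only [pyJoin, ← String.append_assoc]
    rw [h]
    simp [lineCat, ← String.append_assoc]

-- ===== VERDICT (by name: the statement is the Claim_ definition above) =====
theorem format_nodes_spec : Claim_equal_format_nodes := by
  intro up down standby _
  unfold Spec_format_nodes format_nodes format_nodes_alt
  rcases hu : PySem.List.sorted up (fun x => x) false with _ | ⟨a, as⟩ <;>
  rcases hd : PySem.List.sorted down (fun x => x) false with _ | ⟨b, bs⟩ <;>
  rcases hs : PySem.List.sorted standby (fun x => x) false with _ | ⟨c, cs⟩ <;>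
    simp [pvRender, foldl_eq_lineCat, join_eq_lineCat, lineCat, ← String.append_assoc]
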